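-- pv_equiv track=rewrite | github.com/WilliamdeBrun/aoc2024 | Day 9/day9_1.py | swap_places
-- ===== SOURCE A (Python) =====
-- def swap_places(disk_layout):
--     for i in range(len(disk_layout)-1, -1, -1):
--         if disk_layout[i] != ".":
--             for j in range(len(disk_layout)):
--                 if i == j:
--                     return disk_layout
--                 if disk_layout[j] == ".":
--                     temp = "."
--                     disk_layout[j] = disk_layout[i]
--                     disk_layout[i] = temp
--                     break
--     return disk_layout
-- ===== SOURCE B (Python) =====
-- def swap_places(disk_layout):
--     # Count-and-fill compaction: k = number of file blocks; the first k
--     # slots keep their own files, each gap among them is filled with file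
--     # blocks taken from the tail right-to-left; everything past k becomes ".".
--     # Mutates disk_layout in place (like A) and returns it.
--     k = sum(1 for x in disk_layout if x != ".")
--     fills = [x for x in disk_layout[k:] if x != "."][::-1]
--     fi = 0
--     head = []
--     for x in disk_layout[:k]:
--         if x != ".":
--             head.append(x)
--         else:
--             head.append(fills[fi])
--             fi += 1
--     disk_layout[:] = head + ["."] * (len(disk_layout) - k)
--     return disk_layout
-- ===== Notes on version B (the rewrite author's own statement) =====
-- stated objective: alternative
-- what changed: Replaced A's nested index scans (for each rightmost file block, rescan from the left for the first gap and swap) by a single count-and-fill rebuild: count the file blocks k, collect the tail's file blocks right-to-left, and rebuild the first k slots with gaps filled from that list, padding with dots.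
import Mathlib
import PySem

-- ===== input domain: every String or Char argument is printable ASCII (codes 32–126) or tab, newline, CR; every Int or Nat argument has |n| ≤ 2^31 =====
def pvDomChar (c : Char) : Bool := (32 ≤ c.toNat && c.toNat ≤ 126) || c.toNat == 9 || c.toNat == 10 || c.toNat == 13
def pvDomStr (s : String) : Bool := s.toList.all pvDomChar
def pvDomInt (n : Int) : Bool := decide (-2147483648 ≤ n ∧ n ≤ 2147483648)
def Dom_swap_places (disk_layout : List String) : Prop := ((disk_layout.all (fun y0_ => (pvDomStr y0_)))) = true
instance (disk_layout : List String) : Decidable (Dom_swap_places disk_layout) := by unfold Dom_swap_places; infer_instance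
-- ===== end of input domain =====

-- B replaces A's nested index loops (rescan from the left for each moved
-- block) by a one-pass count-and-fill rebuild (objective: alternative).
-- Both Pythons mutate disk_layout in place to the same final content.


-- ===== PORT A =====
-- inner `for j in range(len(disk_layout))` loop; all indices A uses are in
-- range, so getD is exact. `none` = the `return disk_layout` at `i == j`;
-- `some d` = break after the swap (or the loop running off the end, which
-- then continues the outer loop with the unchanged list).
def pvAInner (disk : List String) (i : Nat) (j : Nat) : Option (List String) :=
  if j < disk.length then
    if i == j then none
    else if disk.getD j "" == "." then
      some ((disk.set j (disk.getD i "")).set i ".")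
    else pvAInner disk i (j + 1)
  else some disk
termination_by disk.length - j

-- outer `for i in range(len(disk_layout)-1, -1, -1)` loop; argument n = i + 1
def pvAOuter : List String → Nat → List String
  | disk, 0 => disk
  | disk, n + 1 =>
    if disk.getD n "" ≠ "." then
      match pvAInner disk n 0 with
      | none => disk
      | some d => pvAOuter d n
    else pvAOuter disk n

def swap_places (disk_layout : List String) : List String :=
  pvAOuter disk_layout disk_layout.length

-- ===== PORT B =====
-- the `for x in disk_layout[:k]` loop of B, consuming fills at gaps
-- (fills[fi] is always in range in B; the [] branch is unreachable there)
def pvFillHead : List String → List String → List String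
  | [], _ => []
  | x :: xs, fs =>
    if x ≠ "." then x :: pvFillHead xs fs
    else
      match fs with
      | f :: fs' => f :: pvFillHead xs fs'
      | [] => "." :: pvFillHead xs []

def swap_places_alt (disk_layout : List String) : List String :=
  let k := (disk_layout.filter (fun x => x != ".")).length
  let fills := ((disk_layout.drop k).filter (fun x => x != ".")).reverse
  pvFillHead (disk_layout.take k) fills
    ++ List.replicate (disk_layout.length - k) "."

-- ===== PRECONDITION & SPEC =====
def Spec_swap_places (disk_layout : List String) (out : List String) : Prop := out = swap_places_alt disk_layout
instance (disk_layout : List String) (out : List String) : Decidable (Spec_swap_places disk_layout out) := by unfold Spec_swap_places; infer_instance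

-- ===== CLAIM (what is proved, stated in full; the proofs are below) =====
def Claim_equal_swap_places : Prop := ∀ (disk_layout : List String), Dom_swap_places disk_layout → Spec_swap_places disk_layout (swap_places disk_layout)

-- ===== LEMMAS AND PROOFS =====

-- basic fillHead facts
theorem pvFillHead_nondot_prefix (P ys fs : List String) (h : ∀ x ∈ P, x ≠ ".") :
    pvFillHead (P ++ ys) fs = P ++ pvFillHead ys fs := by
  induction P with
  | nil => rfl
  | cons a P ih =>
    have ha : a ≠ "." := h a (by simp)
    simp [pvFillHead, ha, ih (fun x hx => h x (by simp [hx]))]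

theorem pvFillHead_all_nondot (A fs : List String) (h : ∀ x ∈ A, x ≠ ".") :
    pvFillHead A fs = A := by
  have := pvFillHead_nondot_prefix A [] fs h
  simpa [pvFillHead] using this

theorem filter_nondot_of_all_dot (R : List String) (h : ∀ x ∈ R, x = ".") :
    R.filter (fun x => x != ".") = [] := by
  apply List.filter_eq_nil_iff.mpr
  intro a ha
  simp [h a ha]

theorem filter_nondot_of_all_nondot (P : List String) (h : ∀ x ∈ P, x ≠ ".") :
    P.filter (fun x => x != ".") = P := by
  apply List.filter_eq_self.mpr
  intro a ha
  simp [h a ha]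

theorem replicate_of_all_dot (R : List String) (h : ∀ x ∈ R, x = ".") :
    List.replicate R.length "." = R := by
  symm
  exact List.eq_replicate_of_mem h

-- closed form C is a fixed point on a compacted list
theorem C_fixed (A R : List String) (hA : ∀ x ∈ A, x ≠ ".") (hR : ∀ x ∈ R, x = ".") :
    swap_places_alt (A ++ R) = A ++ R := by
  unfold swap_places_alt
  have hk : ((A ++ R).filter (fun x => x != ".")).length = A.length := by
    simp [List.filter_append, filter_nondot_of_all_dot R hR, filter_nondot_of_all_nondot A hA]
  rw [hk]
  simp only [List.take_left, List.drop_left]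
  rw [filter_nondot_of_all_dot R hR]
  simp only [List.reverse_nil]
  rw [pvFillHead_all_nondot A [] hA]
  simp [replicate_of_all_dot R hR]

-- closed form C is invariant under one of A's swaps
theorem take_len_add (L T : List String) (n : Nat) :
    (L ++ T).take (L.length + n) = L ++ T.take n := by
  induction L with
  | nil => simp
  | cons a L ih => simpa [Nat.succ_add] using ih

theorem drop_len_add (L T : List String) (n : Nat) :
    (L ++ T).drop (L.length + n) = T.drop n := by
  induction L with
  | nil => simp
  | cons a L ih => simpa [Nat.succ_add] using ih

theorem C_swap (P M R : List String) (v : String) (hv : v ≠ ".")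
    (hP : ∀ x ∈ P, x ≠ ".") (hR : ∀ x ∈ R, x = ".") :
    swap_places_alt (P ++ (v :: (M ++ ("." :: R)))) = swap_places_alt (P ++ ("." :: (M ++ (v :: R)))) := by
  simp only [swap_places_alt]
  have hfP := filter_nondot_of_all_nondot P hP
  have hfR := filter_nondot_of_all_dot R hR
  have hvb : (v != ".") = true := by simp [hv]
  set c := (M.filter (fun x => x != ".")).length with hc
  have hcle : c ≤ M.length := by
    simpa [hc] using List.length_filter_le (fun x => x != ".") M
  have hk1 : ((P ++ (v :: (M ++ ("." :: R)))).filter (fun x => x != ".")).length = P.length + (c + 1) := by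
    simp [List.filter_append, hfP, hfR, hvb, hc]
  have hk2 : ((P ++ ("." :: (M ++ (v :: R)))).filter (fun x => x != ".")).length = P.length + (c + 1) := by
    simp [List.filter_append, hfP, hfR, hvb, hc]
  rw [hk1, hk2, take_len_add, take_len_add, drop_len_add, drop_len_add]
  simp only [List.take_succ_cons, List.drop_succ_cons, Nat.add_eq,
    List.take_append_of_le_length hcle, List.drop_append_of_le_length hcle]
  rw [List.filter_append, List.filter_append]
  simp only [List.filter_cons, hvb, if_pos]
  have hdot : (("." : String) != ".") = false := by decide
  rw [hdot, hfR]
  simp only [Bool.false_eq_true, if_false]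
  simp only [List.append_nil, List.reverse_append, List.reverse_cons, List.reverse_nil,
    List.nil_append, List.cons_append]
  rw [pvFillHead_nondot_prefix P _ _ hP, pvFillHead_nondot_prefix P _ _ hP]
  have hstep1 : pvFillHead (v :: M.take c) ((M.drop c).filter (fun x => x != ".")).reverse
      = v :: pvFillHead (M.take c) ((M.drop c).filter (fun x => x != ".")).reverse := by
    simp [pvFillHead, hv]
  have hstep2 : pvFillHead ("." :: M.take c) (v :: ((M.drop c).filter (fun x => x != ".")).reverse)
      = v :: pvFillHead (M.take c) ((M.drop c).filter (fun x => x != ".")).reverse := by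
    simp [pvFillHead]
  rw [hstep1, hstep2]
  have hlen : (P ++ v :: (M ++ "." :: R)).length = (P ++ "." :: (M ++ v :: R)).length := by simp
  rw [hlen]

-- index / membership bridges
theorem getD_eq_elem (L : List String) (p : Nat) (h : p < L.length) : L.getD p "" = L[p] :=
  List.getD_eq_getElem L "" h

theorem mem_take_getD (L : List String) (t : Nat) (x : String) (hx : x ∈ L.take t) :
    ∃ p, p < t ∧ p < L.length ∧ L.getD p "" = x := by
  obtain ⟨p, hp, he⟩ := List.mem_iff_getElem.mp hx
  have hlt : p < t ∧ p < L.length := by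
    have := hp; simp [List.length_take] at this; omega
  exact ⟨p, hlt.1, hlt.2, by rw [getD_eq_elem L p hlt.2, ← he]; simp [List.getElem_take]⟩

theorem mem_drop_getD (L : List String) (t : Nat) (x : String) (hx : x ∈ L.drop t) :
    ∃ p, t ≤ p ∧ p < L.length ∧ L.getD p "" = x := by
  obtain ⟨p, hp, he⟩ := List.mem_iff_getElem.mp hx
  have hlt : t + p < L.length := by
    have := hp; simp [List.length_drop] at this; omega
  refine ⟨t + p, by omega, hlt, ?_⟩
  rw [getD_eq_elem L _ hlt, ← he]
  simp [List.getElem_drop]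

theorem set_at_append (L T : List String) (x y : String) :
    (L ++ (x :: T)).set L.length y = L ++ (y :: T) := by
  induction L with
  | nil => rfl
  | cons a L ih => simp [List.set, ih]

-- list surgery: split a list at two indices i < k
theorem decomp (L : List String) (i k : Nat) (hik : i < k) (hk : k < L.length) :
    L = L.take i ++ (L.getD i "" :: (((L.take k).drop (i + 1)) ++ (L.getD k "" :: L.drop (k + 1)))) := by
  have h1 : L = L.take i ++ L.drop i := (List.take_append_drop i L).symm
  have hi : i < L.length := by omega
  have h2 : L.drop i = L.getD i "" :: L.drop (i + 1) := by
    rw [getD_eq_elem L i hi]; exact List.drop_eq_getElem_cons hi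
  have h3 : L.drop (i + 1) = (L.take k).drop (i + 1) ++ L.drop k := by
    conv_lhs => rw [← List.take_append_drop k L]
    rw [List.drop_append_of_le_length (by simp; omega)]
  have h4 : L.drop k = L.getD k "" :: L.drop (k + 1) := by
    rw [getD_eq_elem L k hk]; exact List.drop_eq_getElem_cons hk
  calc L = L.take i ++ L.drop i := h1
    _ = _ := by rw [h2, h3, h4]

-- characterization of the inner loop: `none` when no gap strictly left of m
theorem pvAInner_none (disk : List String) (m : Nat) (hm : m < disk.length) :
    ∀ d j, m - j = d → j ≤ m → (∀ p, j ≤ p → p < m → disk.getD p "" ≠ ".") →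
      pvAInner disk m j = none := by
  intro d
  induction d with
  | zero =>
    intro j hd hj _
    have : j = m := by omega
    subst this
    rw [pvAInner]
    simp [Nat.lt_of_lt_of_le hm (le_refl _), hm]
  | succ d ih =>
    intro j hd hj hnd
    have hjm : j < m := by omega
    have hne : disk.getD j "" ≠ "." := hnd j (le_refl _) hjm
    rw [pvAInner]
    have hjl : j < disk.length := by omega
    simp only [hjl, if_true, if_pos]
    have hmj : (m == j) = false := by simp; omega
    have hb : (disk.getD j "" == ".") = false := by rw [beq_eq_false_iff_ne]; exact hne
    simp only [hmj, hb, Bool.false_eq_true, if_false]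
    exact ih (j + 1) (by omega) (by omega) (fun p hp1 hp2 => hnd p (by omega) hp2)

-- characterization of the inner loop: swap with the first gap j0 < m
theorem pvAInner_some (disk : List String) (m j0 : Nat) (hm : m < disk.length)
    (hj0m : j0 < m) (hdot : disk.getD j0 "" = ".") :
    ∀ d j, j0 - j = d → j ≤ j0 → (∀ p, j ≤ p → p < j0 → disk.getD p "" ≠ ".") →
      pvAInner disk m j = some ((disk.set j0 (disk.getD m "")).set m ".") := by
  intro d
  induction d with
  | zero =>
    intro j hd hj _
    have hje : j = j0 := by omega
    rw [pvAInner]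
    have hjl : j0 < disk.length := by omega
    have hdot' : disk[j0] = "." := by rw [← getD_eq_elem disk j0 hjl]; exact hdot
    simp [hje, hjl, (show m ≠ j0 by omega), hdot']
  | succ d ih =>
    intro j hd hj hnd
    have hjj : j < j0 := by omega
    have hne : disk.getD j "" ≠ "." := hnd j (le_refl _) hjj
    rw [pvAInner]
    have hjl : j < disk.length := by omega
    have hmj : (m == j) = false := by simp; omega
    have hb : (disk.getD j "" == ".") = false := by rw [beq_eq_false_iff_ne]; exact hne
    simp only [hjl, if_true, if_pos, hmj, hb, Bool.false_eq_true, if_false]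
    exact ih (j + 1) (by omega) (by omega) (fun p hp1 hp2 => hnd p (by omega) hp2)

theorem getD_set_self (l : List String) (i : Nat) (a : String) (h : i < l.length) :
    (l.set i a).getD i "" = a := by
  rw [getD_eq_elem _ i (by simpa using h)]
  simp [h]

theorem getD_set_ne (l : List String) (i j : Nat) (a : String) (h : i ≠ j) :
    (l.set i a).getD j "" = l.getD j "" := by
  simp [List.getD, List.getElem?_set_ne h]

-- main invariant induction over the outer loop: if every slot from n on is
-- already a gap, the rest of A's sweep computes the closed form
theorem pvAOuter_eq_C : ∀ (n : Nat) (disk : List String), n ≤ disk.length →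
    (∀ p, n ≤ p → p < disk.length → disk.getD p "" = ".") →
    pvAOuter disk n = swap_places_alt disk := by
  intro n
  induction n with
  | zero =>
    intro disk _ hinv
    have hR : ∀ x ∈ disk, x = "." := by
      intro x hx
      obtain ⟨p, _, hp, he⟩ := mem_drop_getD disk 0 x (by simpa using hx)
      exact he ▸ hinv p (by omega) hp
    have := C_fixed [] disk (by simp) hR
    simpa [pvAOuter] using this.symm
  | succ n ih =>
    intro disk hlen hinv
    have hm : n < disk.length := by omega
    by_cases h1 : disk.getD n "" = "."
    · rw [pvAOuter, if_neg (not_not_intro h1)]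
      exact ih disk (by omega) (fun p hp1 hp2 => by
        rcases Nat.eq_or_lt_of_le hp1 with h | h
        · exact h ▸ h1
        · exact hinv p (by omega) hp2)
    · by_cases h2 : ∃ p, p < n ∧ disk.getD p "" = "."
      · -- swap with the leftmost gap j0, then continue
        have hde : DecidablePred (fun p => p < n ∧ disk.getD p "" = ".") := fun p => by infer_instance
        have hj0 := Nat.find_spec h2
        set j0 := Nat.find h2 with hj0def
        have hj0m : j0 < n := hj0.1
        have hj0dot : disk.getD j0 "" = "." := hj0.2
        have hmin : ∀ p, p < j0 → disk.getD p "" ≠ "." := by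
          intro p hp hc
          exact Nat.find_min h2 hp ⟨by omega, hc⟩
        set v := disk.getD n "" with hv
        set disk' := (disk.set j0 v).set n "." with hd'
        rw [pvAOuter, if_pos h1,
          pvAInner_some disk n j0 hm hj0m hj0dot j0 0 rfl (by omega) (fun p hp1 hp2 => hmin p hp2)]
        show pvAOuter ((disk.set j0 v).set n ".") n = swap_places_alt disk
        rw [← hd']
        have hlen' : disk'.length = disk.length := by simp [hd']
        have hinv' : ∀ p, n ≤ p → p < disk'.length → disk'.getD p "" = "." := by
          intro p hp1 hp2
          rw [hlen'] at hp2
          rcases Nat.eq_or_lt_of_le hp1 with h | h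
          · rw [hd', ← h]
            exact getD_set_self _ n "." (by simpa using hm)
          · rw [hd', getD_set_ne _ n p "." (by omega), getD_set_ne _ j0 p v (by omega)]
            exact hinv p (by omega) hp2
        rw [ih disk' (by omega) hinv']
        -- C is invariant under the swap
        set P := disk.take j0 with hP
        set M := (disk.take n).drop (j0 + 1) with hM
        set R := disk.drop (n + 1) with hR
        have hdec : disk = P ++ ("." :: (M ++ (v :: R))) := by
          have := decomp disk j0 n hj0m hm
          rw [hj0dot, ← hv] at this
          simpa [hP, hM, hR] using this
        have hPlen : P.length = j0 := by simp [hP]; omega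
        have hMlen : M.length = n - j0 - 1 := by simp [hM]; omega
        have hd'dec : disk' = P ++ (v :: (M ++ ("." :: R))) := by
          rw [hd']
          conv_lhs => rw [hdec]
          rw [← hPlen, set_at_append]
          have hn : n = (P ++ (v :: M)).length := by simp [hPlen, hMlen]; omega
          rw [hn]
          have : P ++ (v :: (M ++ (v :: R))) = (P ++ (v :: M)) ++ (v :: R) := by simp
          rw [this, set_at_append]
          simp
        have hPnd : ∀ x ∈ P, x ≠ "." := by
          intro x hx
          obtain ⟨p, hp1, hp2, he⟩ := mem_take_getD disk j0 x hx
          exact he ▸ hmin p hp1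
        have hRd : ∀ x ∈ R, x = "." := by
          intro x hx
          obtain ⟨p, hp1, hp2, he⟩ := mem_drop_getD disk (n + 1) x hx
          exact he ▸ hinv p (by omega) hp2
        rw [hd'dec]
        conv_rhs => rw [hdec]
        exact C_swap P M R v h1 hPnd hRd
      · -- no gap left of n: the inner loop hits i == j and A returns; disk is compacted
        push_neg at h2
        rw [pvAOuter, if_pos h1,
          pvAInner_none disk n hm n 0 rfl (by omega) (fun p _ hp2 => h2 p hp2)]
        show disk = swap_places_alt disk
        set A := disk.take (n + 1) with hA
        set R := disk.drop (n + 1) with hR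
        have hAnd : ∀ x ∈ A, x ≠ "." := by
          intro x hx
          obtain ⟨p, hp1, hp2, he⟩ := mem_take_getD disk (n + 1) x hx
          rcases Nat.lt_succ_iff_lt_or_eq.mp hp1 with h | h
          · exact he ▸ h2 p h
          · subst h; exact he ▸ h1
        have hRd : ∀ x ∈ R, x = "." := by
          intro x hx
          obtain ⟨p, hp1, hp2, he⟩ := mem_drop_getD disk (n + 1) x hx
          exact he ▸ hinv p (by omega) hp2
        have := C_fixed A R hAnd hRd
        rw [show A ++ R = disk from List.take_append_drop (n + 1) disk] at this
        exact this.symm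

-- ===== VERDICT (by name: the statement is the Claim_ definition above) =====
theorem swap_places_spec : Claim_equal_swap_places := by
  intro disk _
  show swap_places disk = swap_places_alt disk
  exact pvAOuter_eq_C disk.length disk (le_refl _) (fun p hp1 hp2 => by omega)
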